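-- pv_equiv track=rewrite | github.com/Hall-No-7/ps-study | binary-h0/2019-findPathGame.py | solution
-- ===== SOURCE A (Python) =====
-- class Node:
--     def __init__(self, info : list):
--         self.x = info[0]
--         self.y = info[1]
--         self.val = info[2]
--         self.l = None
--         self.r = None
--
-- class Tree:
--     def __init__(self):
--         self.node = None
--
--     def append(self, _node : Node):
--         if self.node == None:
--             self.node = _node
--             return
--         root = self.node
--         while root != None:
--             if _node.x < root.x:
--                 if root.l == None:
--                     root.l = _node
--                     break
--                 root = root.l
--             else:
--                 if root.r == None:
--                     root.r = _node
--                     break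
--                 root = root.r
--
-- def preorder(root : Node, lis : list):
--     if root == None:
--         return
--     lis.append(root.val)
--     preorder(root.l, lis)
--     preorder(root.r, lis)
--
-- def postorder(root : Node, lis : list):
--     if root == None:
--         return
--     postorder(root.l, lis)
--     postorder(root.r, lis)
--     lis.append(root.val)
--
-- def solution(nodeinfo):
--     answer = []
--     for i in range(len(nodeinfo)): nodeinfo[i].append(i + 1)
--     nodeinfo.sort(key=lambda x: x[0])
--     nodeinfo.sort(reverse=True, key=lambda x: x[1])
--     tree = Tree()
--     for node in nodeinfo:
--         _node = Node(node)
--         tree.append(_node)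
--     lis = []
--     preorder(tree.node, lis)
--     answer.append(lis)
--     lis = []
--     postorder(tree.node, lis)
--     answer.append(lis)
--
--
--
--     return answer
-- ===== SOURCE B (Python) =====
-- def build(nodes):
--     if not nodes:
--         return [], []
--     (x, v), rest = nodes[0], nodes[1:]
--     left = [p for p in rest if p[0] < x]
--     right = [p for p in rest if p[0] >= x]
--     pl, ql = build(left)
--     pr, qr = build(right)
--     return [v] + pl + pr, ql + qr + [v]
--
-- def solution(nodeinfo):
--     rows = [row + [i + 1] for i, row in enumerate(nodeinfo)]
--     rows.sort(key=lambda r: r[0])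
--     rows.sort(reverse=True, key=lambda r: r[1])
--     nodes = [(r[0], r[2]) for r in rows]
--     pre, post = build(nodes)
--     return [pre, post]
-- ===== Notes on version B (the rewrite author's own statement) =====
-- stated objective: alternative
-- what changed: Replaces the mutable Node/Tree classes and the per-node while-loop BST insertion with a direct recursive partition of the y-sorted list by x against its head, emitting preorder and postorder lists without building a tree.
import Mathlib
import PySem

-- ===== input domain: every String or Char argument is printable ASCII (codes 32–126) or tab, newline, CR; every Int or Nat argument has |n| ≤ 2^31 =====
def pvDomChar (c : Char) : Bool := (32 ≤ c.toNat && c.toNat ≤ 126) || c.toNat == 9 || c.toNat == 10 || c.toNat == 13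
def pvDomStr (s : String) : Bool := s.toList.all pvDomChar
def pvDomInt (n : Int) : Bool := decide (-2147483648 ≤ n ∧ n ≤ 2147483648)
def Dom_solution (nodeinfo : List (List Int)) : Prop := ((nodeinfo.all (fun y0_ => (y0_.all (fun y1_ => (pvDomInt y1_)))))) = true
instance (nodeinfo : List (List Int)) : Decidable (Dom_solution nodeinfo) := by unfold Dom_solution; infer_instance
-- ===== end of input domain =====

-- B replaces A's pointer-chasing BST insertion with a direct recursive partition of the
-- y-sorted list that emits the preorder/postorder lists without building a tree (objective:
-- alternative). Equivalence is about the RETURN value only: A mutates nodeinfo in place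
-- (appends labels, sorts), B does not.

-- ===== PORT A =====
inductive BT where
  | nil : BT
  | node : Int → Int → Int → BT → BT → BT
deriving DecidableEq, Repr

-- Tree.append: the while loop descends left on x < root.x, else right; transcribed as recursion
def insertBT : BT → Int → Int → Int → BT
  | .nil, x, y, v => .node x y v .nil .nil
  | .node rx ry rv l r, x, y, v =>
      if x < rx then .node rx ry rv (insertBT l x y v) r
      else .node rx ry rv l (insertBT r x y v)

-- preorder(root, lis): lis is the accumulator being appended to
def preBT : BT → List Int → List Int
  | .nil, acc => acc
  | .node _ _ v l r, acc => preBT r (preBT l (acc ++ [v]))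

def postBT : BT → List Int → List Int
  | .nil, acc => acc
  | .node _ _ v l r, acc => (postBT r (postBT l acc)) ++ [v]

def solution (nodeinfo : List (List Int)) : List (List Int) :=
  let rows := nodeinfo.mapIdx (fun i row => row ++ [((i : Int) + 1)])
  let rows1 := PySem.List.sorted rows (fun r => PySem.List.pyGetD r 0 0) false
  let rows2 := PySem.List.sorted rows1 (fun r => PySem.List.pyGetD r 1 0) true
  let t := rows2.foldl
    (fun t row => insertBT t (PySem.List.pyGetD row 0 0) (PySem.List.pyGetD row 1 0)
                    (PySem.List.pyGetD row 2 0)) BT.nil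
  [preBT t [], postBT t []]

-- ===== PORT B =====
-- build(nodes): partition the tail by x against the head, recurse, emit both orders directly
def buildB : List (Int × Int) → List Int × List Int
  | [] => ([], [])
  | (x, v) :: rest =>
      let left := rest.filter (fun p => decide (p.1 < x))
      let right := rest.filter (fun p => decide (x ≤ p.1))
      let pl := (buildB left).1
      let ql := (buildB left).2
      let pr := (buildB right).1
      let qr := (buildB right).2
      (v :: (pl ++ pr), ql ++ (qr ++ [v]))
  termination_by ns => ns.length
  decreasing_by
    all_goals
      simp only [List.length_unattach]
      exact Nat.lt_succ_of_le (le_trans (List.length_filter_le _ _) (by simp))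

def solution_alt (nodeinfo : List (List Int)) : List (List Int) :=
  let rows := nodeinfo.mapIdx (fun i row => row ++ [((i : Int) + 1)])
  let rows1 := PySem.List.sorted rows (fun r => PySem.List.pyGetD r 0 0) false
  let rows2 := PySem.List.sorted rows1 (fun r => PySem.List.pyGetD r 1 0) true
  let nodes := rows2.map (fun r => (PySem.List.pyGetD r 0 0, PySem.List.pyGetD r 2 0))
  [(buildB nodes).1, (buildB nodes).2]

-- ===== PRECONDITION & SPEC =====
-- Python A raises IndexError (Node reads info[0], info[1]) on any row shorter than 2
def Pre_solution (nodeinfo : List (List Int)) : Prop :=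
  ∀ row ∈ nodeinfo, 2 ≤ row.length
instance (nodeinfo : List (List Int)) : Decidable (Pre_solution nodeinfo) := by
  unfold Pre_solution; infer_instance
def pvWitness_solution : List (List Int) := [[1, 2], [3, 4], [2, 2]]

def Spec_solution (nodeinfo : List (List Int)) (out : List (List Int)) : Prop := out = solution_alt nodeinfo
instance (nodeinfo : List (List Int)) (out : List (List Int)) : Decidable (Spec_solution nodeinfo out) := by unfold Spec_solution; infer_instance

-- ===== CLAIM (what is proved, stated in full; the proofs are below) =====
def Claim_equal_solution : Prop := ∀ (nodeinfo : List (List Int)), Dom_solution nodeinfo → Pre_solution nodeinfo → Spec_solution nodeinfo (solution nodeinfo)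

-- ===== LEMMAS AND PROOFS =====

def insRow (t : BT) (row : List Int) : BT :=
  insertBT t (PySem.List.pyGetD row 0 0) (PySem.List.pyGetD row 1 0) (PySem.List.pyGetD row 2 0)

theorem preBT_acc (t : BT) (acc : List Int) : preBT t acc = acc ++ preBT t [] := by
  induction t generalizing acc with
  | nil => simp [preBT]
  | node x y v l r ihl ihr =>
      simp only [preBT]
      rw [ihr (preBT l (acc ++ [v])), ihl (acc ++ [v]), ihr (preBT l ([] ++ [v])), ihl ([] ++ [v])]
      simp

theorem postBT_acc (t : BT) (acc : List Int) : postBT t acc = acc ++ postBT t [] := by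
  induction t generalizing acc with
  | nil => simp [postBT]
  | node x y v l r ihl ihr =>
      simp only [postBT]
      rw [ihr (postBT l acc), ihl acc, ihr (postBT l [])]
      simp

-- inserting a stream into a node splits it by the key against the root
theorem foldl_ins_node (ms : List (List Int)) (x y v : Int) (l r : BT) :
    ms.foldl insRow (.node x y v l r) =
      .node x y v
        ((ms.filter (fun m => decide (PySem.List.pyGetD m 0 0 < x))).foldl insRow l)
        ((ms.filter (fun m => decide (x ≤ PySem.List.pyGetD m 0 0))).foldl insRow r) := by
  induction ms generalizing l r with
  | nil => simp
  | cons m ms ih =>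
      by_cases h : PySem.List.pyGetD m 0 0 < x
      · simp only [List.foldl_cons, List.filter_cons, insRow, insertBT, if_pos h,
          decide_eq_true_eq, h, not_le.mpr h, decide_false, if_false, decide_true, if_true]
        exact ih (insertBT l _ _ _) r
      · simp only [List.foldl_cons, List.filter_cons, insRow, insertBT, if_neg h,
          decide_eq_true_eq, h, not_lt.mp h, decide_false, if_false, decide_true, if_true]
        exact ih l (insertBT r _ _ _)

theorem main_build (n : Nat) : ∀ rs : List (List Int), rs.length ≤ n →
    preBT (rs.foldl insRow .nil) [] =
      (buildB (rs.map (fun r => (PySem.List.pyGetD r 0 0, PySem.List.pyGetD r 2 0)))).1 ∧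
    postBT (rs.foldl insRow .nil) [] =
      (buildB (rs.map (fun r => (PySem.List.pyGetD r 0 0, PySem.List.pyGetD r 2 0)))).2 := by
  induction n with
  | zero =>
      intro rs h
      have : rs = [] := List.length_eq_zero_iff.mp (Nat.le_zero.mp h)
      subst this
      simp [preBT, postBT, buildB]
  | succ n ih =>
      intro rs h
      match rs with
      | [] => simp [preBT, postBT, buildB]
      | r :: rest =>
          have hstep : (r :: rest).foldl insRow .nil =
              .node (PySem.List.pyGetD r 0 0) (PySem.List.pyGetD r 1 0) (PySem.List.pyGetD r 2 0)
                ((rest.filter (fun m => decide (PySem.List.pyGetD m 0 0 < PySem.List.pyGetD r 0 0))).foldl insRow .nil)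
                ((rest.filter (fun m => decide (PySem.List.pyGetD r 0 0 ≤ PySem.List.pyGetD m 0 0))).foldl insRow .nil) := by
            simpa [insRow, insertBT] using
              foldl_ins_node rest (PySem.List.pyGetD r 0 0) (PySem.List.pyGetD r 1 0)
                (PySem.List.pyGetD r 2 0) .nil .nil
          have hlen : rest.length ≤ n := Nat.lt_succ_iff.mp (by simpa using h)
          have hL := ih (rest.filter (fun m => decide (PySem.List.pyGetD m 0 0 < PySem.List.pyGetD r 0 0)))
            (le_trans (List.length_filter_le _ _) hlen)
          have hR := ih (rest.filter (fun m => decide (PySem.List.pyGetD r 0 0 ≤ PySem.List.pyGetD m 0 0)))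
            (le_trans (List.length_filter_le _ _) hlen)
          have hmapL : (rest.filter (fun m => decide (PySem.List.pyGetD m 0 0 < PySem.List.pyGetD r 0 0))).map
                (fun r => (PySem.List.pyGetD r 0 0, PySem.List.pyGetD r 2 0)) =
              (rest.map (fun r => (PySem.List.pyGetD r 0 0, PySem.List.pyGetD r 2 0))).filter
                (fun p => decide (p.1 < PySem.List.pyGetD r 0 0)) := by
            rw [List.filter_map]; rfl
          have hmapR : (rest.filter (fun m => decide (PySem.List.pyGetD r 0 0 ≤ PySem.List.pyGetD m 0 0))).map
                (fun r => (PySem.List.pyGetD r 0 0, PySem.List.pyGetD r 2 0)) =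
              (rest.map (fun r => (PySem.List.pyGetD r 0 0, PySem.List.pyGetD r 2 0))).filter
                (fun p => decide (PySem.List.pyGetD r 0 0 ≤ p.1)) := by
            rw [List.filter_map]; rfl
          constructor
          · rw [hstep]
            simp only [preBT]
            rw [preBT_acc, preBT_acc]
            rw [List.map_cons, buildB]
            simp only [← hmapL, ← hmapR]
            simp [hL.1, hR.1]
          · rw [hstep]
            simp only [postBT]
            rw [postBT_acc]
            rw [List.map_cons, buildB]
            simp only [← hmapL, ← hmapR]
            simp [hL.2, hR.2]

-- ===== VERDICT (by name: the statement is the Claim_ definition above) =====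
theorem solution_spec : Claim_equal_solution := by
  intro nodeinfo _ _
  unfold Spec_solution
  simp only [solution, solution_alt]
  have e : (fun t row => insertBT t (PySem.List.pyGetD row 0 0) (PySem.List.pyGetD row 1 0)
      (PySem.List.pyGetD row 2 0)) = insRow := rfl
  rw [e]
  have h := main_build _ (PySem.List.sorted
      (PySem.List.sorted (nodeinfo.mapIdx (fun i row => row ++ [((i : Int) + 1)]))
        (fun r => PySem.List.pyGetD r 0 0) false)
      (fun r => PySem.List.pyGetD r 1 0) true) le_rfl
  rw [h.1, h.2]
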